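-- pv_equiv track=rewrite | github.com/facebookresearch/aroma-paper-artifacts | reference/src/main/python/similar.py | find_similarity_score_features_set_un
-- ===== SOURCE A (Python) =====
-- from collections import Counter, OrderedDict
--
-- def find_similarity_score_features_set_un(records):
--     features_as_counters = []
--     for record in records:
--         features_as_counters.append(Counter(record["features"]))
--     intersection = None
--     for counter in features_as_counters:
--         if intersection is None:
--             intersection = counter
--         else:
--             intersection = intersection & counter
--     return sum(intersection.values())
-- ===== SOURCE B (Python) =====
-- def find_similarity_score_features_set_un(records):
--     # Multiset intersection kept as a plain list with occurrence removal:
--     # no Counter, no per-feature counts; answer is the length of the surviving list.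
--     inter = list(records[0]["features"])
--     for record in records[1:]:
--         pool = list(record["features"])
--         kept = []
--         for x in inter:
--             if x in pool:
--                 pool.remove(x)
--                 kept.append(x)
--         inter = kept
--     return len(inter)
-- ===== Notes on version B (the rewrite author's own statement) =====
-- stated objective: alternative
-- what changed: Drops Counter entirely: keeps the running multiset intersection as a plain list, cancelling one matching occurrence out of each later record's feature list per kept element, and returns the final list's length instead of summing counts.
-- outside the precondition, e.g. on find_similarity_score_features_set_un([]): A raises AttributeError, B raises IndexError
import Mathlib
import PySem

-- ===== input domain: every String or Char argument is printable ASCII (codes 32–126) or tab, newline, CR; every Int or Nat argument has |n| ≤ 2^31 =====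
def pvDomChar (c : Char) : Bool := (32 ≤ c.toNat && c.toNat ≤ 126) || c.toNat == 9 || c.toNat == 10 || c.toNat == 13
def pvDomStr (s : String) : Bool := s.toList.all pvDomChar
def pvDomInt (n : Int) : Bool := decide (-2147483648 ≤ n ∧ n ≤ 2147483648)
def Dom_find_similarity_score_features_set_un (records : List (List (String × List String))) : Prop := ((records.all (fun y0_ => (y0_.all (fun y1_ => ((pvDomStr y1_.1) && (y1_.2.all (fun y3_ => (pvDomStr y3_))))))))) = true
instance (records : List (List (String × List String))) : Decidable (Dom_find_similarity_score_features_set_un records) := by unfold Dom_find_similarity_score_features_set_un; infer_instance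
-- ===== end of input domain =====

-- B drops Counter entirely: it keeps the running multiset intersection as a plain list,
-- cancelling one matching occurrence out of each later record's feature list per kept element,
-- and returns the final list's length; same return value wherever A returns (Pre_ excludes the
-- inputs where A raises: empty records or a record without a "features" key).


-- record["features"] for an assoc-list record (lookup = first match; "features" KeyError excluded by Pre_, default [] unreachable there)
def pvFeats (record : List (String × List String)) : List String :=
  (PySem.Dict.mk record).getD "features" []

-- ===== PORT A =====
-- Counter(record["features"])
def pvCounterOf (record : List (String × List String)) : PySem.Dict String Int :=
  PySem.Dict.counter (pvFeats record)

-- Counter.__and__: iterate self.items(), newcount = min via branch, keep only positive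
def pvCounterAnd (a b : PySem.Dict String Int) : PySem.Dict String Int :=
  a.items.foldl (fun r p =>
    let oc := b.getD p.1 0
    let newcount := if p.2 < oc then p.2 else oc
    if 0 < newcount then r.insert p.1 newcount else r) PySem.Dict.empty

def find_similarity_score_features_set_un (records : List (List (String × List String))) : Int :=
  let featuresAsCounters := records.foldl (fun acc record => acc ++ [pvCounterOf record]) []
  let intersection := featuresAsCounters.foldl
    (fun (inter : Option (PySem.Dict String Int)) counter =>
      match inter with
      | none => some counter
      | some d => some (pvCounterAnd d counter)) none
  match intersection with
  | some d => d.values.sum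
  | none => 0  -- Python: sum(None.values()) raises AttributeError; excluded by Pre_

-- ===== PORT B =====
-- the inner 'for x in inter' loop of Source B: pool.remove(x) on a present x removes the first
-- occurrence (= List.erase, PySem.List.remove?_eq_some_erase), kept.append(x)
def pvKeepLoop (pool kept inter : List String) : List String :=
  match inter with
  | [] => kept
  | x :: xs =>
    if pool.contains x then pvKeepLoop (pool.erase x) (kept ++ [x]) xs
    else pvKeepLoop pool kept xs

def find_similarity_score_features_set_un_alt (records : List (List (String × List String))) : Int :=
  match records with
  | [] => 0  -- Python B: records[0] raises IndexError; excluded by Pre_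
  | r :: rs =>
    let final := rs.foldl (fun inter record => pvKeepLoop (pvFeats record) [] inter) (pvFeats r)
    (final.length : Int)

-- ===== PRECONDITION & SPEC =====
-- Pre_ excludes exactly the inputs where A raises: [] (AttributeError) and records missing the
-- "features" key (KeyError); B raises on the same inputs (IndexError / KeyError).
def Pre_find_similarity_score_features_set_un (records : List (List (String × List String))) : Prop :=
  records ≠ [] ∧ ∀ record ∈ records, (PySem.Dict.mk record).contains "features" = true
instance (records : List (List (String × List String))) : Decidable (Pre_find_similarity_score_features_set_un records) := by unfold Pre_find_similarity_score_features_set_un; infer_instance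

def pvWitness_find_similarity_score_features_set_un : (List (List (String × List String))) :=
  [[("features", ["a", "b", "a"])], [("features", ["a", "c"])]]

def Spec_find_similarity_score_features_set_un (records : List (List (String × List String))) (out : Int) : Prop := out = find_similarity_score_features_set_un_alt records
instance (records : List (List (String × List String))) (out : Int) : Decidable (Spec_find_similarity_score_features_set_un records out) := by unfold Spec_find_similarity_score_features_set_un; infer_instance

-- ===== CLAIM (what is proved, stated in full; the proofs are below) =====
def Claim_equal_find_similarity_score_features_set_un : Prop := ∀ (records : List (List (String × List String))), Dom_find_similarity_score_features_set_un records → Pre_find_similarity_score_features_set_un records → Spec_find_similarity_score_features_set_un records (find_similarity_score_features_set_un records)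

-- ===== LEMMAS AND PROOFS =====

-- running minimum of the counts of key k over the counters cs, starting from v
def pvMval (k : String) (v : Int) (cs : List (PySem.Dict String Int)) : Int :=
  cs.foldl (fun m c => min m (c.getD k 0)) v

theorem pvMval_nil (k : String) (v : Int) : pvMval k v [] = v := rfl

theorem pvMval_cons (k : String) (v : Int) (c : PySem.Dict String Int)
    (cs : List (PySem.Dict String Int)) :
    pvMval k v (c :: cs) = pvMval k (min v (c.getD k 0)) cs := rfl

theorem pvMval_le (k : String) (v : Int) (cs : List (PySem.Dict String Int)) :
    pvMval k v cs ≤ v := by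
  induction cs generalizing v with
  | nil => simp [pvMval_nil]
  | cons c cs ih =>
      rw [pvMval_cons]
      exact le_trans (ih _) (min_le_left _ _)

theorem pvCounterAnd_items (a b : PySem.Dict String Int) (hnd : a.keys.Nodup) :
    (pvCounterAnd a b).items
      = (a.items.filter (fun p => decide (0 < pvMval p.1 p.2 [b]))).map
          (fun p => (p.1, pvMval p.1 p.2 [b])) := by
  unfold pvCounterAnd
  have hstep : ∀ (r : PySem.Dict String Int) (p : String × Int),
      (let oc := b.getD p.1 0
       let newcount := if p.2 < oc then p.2 else oc
       if 0 < newcount then r.insert p.1 newcount else r)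
      = if 0 < pvMval p.1 p.2 [b] then r.insert p.1 (pvMval p.1 p.2 [b]) else r := by
    intro r p
    have hmin : (if p.2 < b.getD p.1 0 then p.2 else b.getD p.1 0) = pvMval p.1 p.2 [b] := by
      simp only [pvMval_cons, pvMval_nil, min_def]
      split_ifs <;> omega
    simp only [hmin]
  have hfold := PySem.List.foldl_congr_mem a.items _
      (fun (r : PySem.Dict String Int) p =>
        if 0 < pvMval p.1 p.2 [b] then r.insert p.1 (pvMval p.1 p.2 [b]) else r)
      PySem.Dict.empty (fun r p _ => hstep r p)
  rw [hfold]
  have h2 := PySem.List.foldl_ite_eq_foldl_filter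
        (p := fun p : String × Int => 0 < pvMval p.1 p.2 [b])
        (f := fun (r : PySem.Dict String Int) p => r.insert p.1 (pvMval p.1 p.2 [b]))
        a.items PySem.Dict.empty
  rw [h2]
  have hnd : ((a.items.filter (fun p => decide (0 < pvMval p.1 p.2 [b]))).map
        (fun p : String × Int => p.1)).Nodup := by
    have hsub : ((a.items.filter (fun p => decide (0 < pvMval p.1 p.2 [b]))).map
        (fun p : String × Int => p.1)).Sublist (a.items.map (fun p => p.1)) :=
      List.Sublist.map _ List.filter_sublist
    exact List.Nodup.sublist hsub hnd
  have hcont : ∀ p ∈ a.items.filter (fun p => decide (0 < pvMval p.1 p.2 [b])),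
      (PySem.Dict.empty : PySem.Dict String Int).contains p.1 = false := by
    intro p _
    exact PySem.Dict.contains_empty _
  rw [PySem.Dict.items_foldl_insert_fresh _ _ _ _ hcont hnd]
  rfl

-- characterisation of the fold of pairwise intersections (values of d positive: it is a Counter)
theorem pvFoldInter_items (cs : List (PySem.Dict String Int)) (d : PySem.Dict String Int)
    (hnd : d.keys.Nodup) (hpos : ∀ p ∈ d.items, 0 < p.2) :
    (cs.foldl pvCounterAnd d).items
      = (d.items.filter (fun p => decide (0 < pvMval p.1 p.2 cs))).map
          (fun p => (p.1, pvMval p.1 p.2 cs)) := by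
  induction cs generalizing d with
  | nil =>
      simp only [List.foldl_nil]
      have h1 : d.items.filter (fun p => decide (0 < pvMval p.1 p.2 [])) = d.items :=
        List.filter_eq_self.mpr (fun p hp => by
          simpa [pvMval_nil] using hpos p hp)
      rw [h1]
      simp [pvMval_nil]
  | cons c cs ih =>
      rw [List.foldl_cons]
      have hpos' : ∀ p ∈ (pvCounterAnd d c).items, 0 < p.2 := by
        intro p hp
        rw [pvCounterAnd_items d c hnd] at hp
        obtain ⟨q, hq, rfl⟩ := List.mem_map.mp hp
        have := List.of_mem_filter hq
        simpa using this
      have hnd' : (pvCounterAnd d c).keys.Nodup := by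
        show ((pvCounterAnd d c).items.map (fun p => p.1)).Nodup
        rw [pvCounterAnd_items d c hnd, List.map_map]
        have hsub : ((d.items.filter (fun p => decide (0 < pvMval p.1 p.2 [c]))).map
            ((fun p : String × Int => p.1) ∘ (fun p => (p.1, pvMval p.1 p.2 [c])))).Sublist
            (d.items.map (fun p => p.1)) := by
          have : ((fun p : String × Int => p.1) ∘
              (fun p : String × Int => (p.1, pvMval p.1 p.2 [c]))) = (fun p => p.1) := rfl
          rw [this]
          exact List.Sublist.map _ List.filter_sublist
        exact List.Nodup.sublist hsub hnd
      rw [ih _ hnd' hpos', pvCounterAnd_items d c hnd, List.filter_map, List.map_map, List.filter_filter]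
      have hfil : d.items.filter
            (fun a => ((fun p => decide (0 < pvMval p.1 p.2 cs)) ∘
                (fun p => (p.1, pvMval p.1 p.2 [c]))) a && decide (0 < pvMval a.1 a.2 [c]))
          = d.items.filter (fun p => decide (0 < pvMval p.1 p.2 (c :: cs))) := by
        apply List.filter_congr
        intro p _
        simp only [Function.comp, pvMval_cons, pvMval_nil]
        by_cases h1 : 0 < min p.2 (c.getD p.1 0)
        · simp [h1]
        · have h2 : pvMval p.1 (min p.2 (c.getD p.1 0)) cs ≤ min p.2 (c.getD p.1 0) :=
            pvMval_le _ _ _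
          have h3 : ¬ 0 < pvMval p.1 (min p.2 (c.getD p.1 0)) cs := by omega
          simp [h1, h3]
      rw [hfil]
      apply List.map_congr_left
      intro p _
      simp [Function.comp, pvMval_cons, pvMval_nil]

-- the Option-accumulator fold of A, once started, is the plain fold of pairwise intersections
theorem pvOptFold (cs : List (PySem.Dict String Int)) (d : PySem.Dict String Int) :
    cs.foldl (fun (inter : Option (PySem.Dict String Int)) counter =>
        match inter with
        | none => some counter
        | some d => some (pvCounterAnd d counter)) (some d)
      = some (cs.foldl pvCounterAnd d) := by
  induction cs generalizing d with
  | nil => rfl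
  | cons c cs ih => simpa using ih (pvCounterAnd d c)

theorem pvMval_nonneg (k : String) (v : Int) (cs : List (PySem.Dict String Int))
    (hv : 0 ≤ v) (hcs : ∀ c ∈ cs, 0 ≤ c.getD k 0) : 0 ≤ pvMval k v cs := by
  induction cs generalizing v with
  | nil => simpa [pvMval_nil] using hv
  | cons c cs ih =>
      rw [pvMval_cons]
      exact ih _ (le_min hv (hcs c (List.mem_cons_self))) (fun c hc => hcs c (List.mem_cons_of_mem _ hc))

-- dropping the zero terms of a nonnegative sum changes nothing
theorem pvSum_filter_pos {α : Type} (f : α → Int) (l : List α) (h : ∀ p ∈ l, 0 ≤ f p) :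
    ((l.filter (fun p => decide (0 < f p))).map f).sum = (l.map f).sum := by
  induction l with
  | nil => rfl
  | cons a l ih =>
      have ha := h a (List.mem_cons_self)
      have ih' := ih (fun p hp => h p (List.mem_cons_of_mem _ hp))
      by_cases hpos : 0 < f a
      · simp [hpos, ih']
      · have : f a = 0 := by omega
        simp [ih', this]

theorem pvCounterOf_nodup (record : List (String × List String)) :
    (pvCounterOf record).keys.Nodup := PySem.Dict.nodup_keys_counter _

theorem pvCounterOf_pos (record : List (String × List String)) :
    ∀ p ∈ (pvCounterOf record).items, 0 < p.2 := by
  intro p hp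
  unfold pvCounterOf at hp
  rw [PySem.Dict.items_counter] at hp
  obtain ⟨k, hk, rfl⟩ := List.mem_map.mp hp
  have hmem : k ∈ pvFeats record := (PySem.Set.mem_ofList _ _).mp hk
  have h0 : 0 < (pvFeats record).count k := List.count_pos_iff.mpr hmem
  simpa using h0

theorem pvCounterOf_getD_nonneg (record : List (String × List String)) (k : String) :
    0 ≤ (pvCounterOf record).getD k 0 := by
  unfold pvCounterOf
  rw [PySem.Dict.getD_counter]
  exact_mod_cast Nat.zero_le _

theorem pvMatchSome (d : PySem.Dict String Int) :
    (match (some d : Option (PySem.Dict String Int)) with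
     | some d => d.values.sum
     | none => (0 : Int)) = d.values.sum := rfl

-- ---- B-side lemmas: the list-cancellation loop computes per-feature minima ----

-- one pass of the inner loop: counts are min'ed against the pool
theorem pvKeepLoop_count (inter : List String) (pool kept : List String) (f : String) :
    (pvKeepLoop pool kept inter).count f
      = kept.count f + min (inter.count f) (pool.count f) := by
  induction inter generalizing pool kept with
  | nil => simp [pvKeepLoop]
  | cons x xs ih =>
      unfold pvKeepLoop
      have herase := List.count_erase (a := f) (b := x) (l := pool)
      by_cases hmem : x ∈ pool
      · have hc : pool.contains x = true := by simpa using hmem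
        have h1 : 0 < pool.count x := List.count_pos_iff.mpr hmem
        rw [hc, if_pos rfl, ih]
        by_cases hfx : f = x
        · rw [hfx] at herase ⊢
          have hxx : (x == x) = true := by simp
          simp only [hxx, if_true] at herase
          simp only [List.count_append, List.count_cons, List.count_nil, hxx, if_true, herase]
          omega
        · have hb : (f == x) = false := by simpa using hfx
          have hb2 : (x == f) = false := by simpa using (Ne.symm hfx)
          simp only [hb2, Bool.false_eq_true, if_false] at herase
          simp only [List.count_append, List.count_cons, List.count_nil, hb, hb2,
            Bool.false_eq_true, if_false, herase]
          omega
      · have hc : pool.contains x = false := by simpa using hmem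
        have h0 : pool.count x = 0 := List.count_eq_zero.mpr hmem
        rw [hc]
        simp only [Bool.false_eq_true, if_false]
        rw [ih]
        by_cases hfx : f = x
        · rw [hfx]
          have hxx : (x == x) = true := by simp
          simp only [List.count_cons, hxx, if_true, h0]
          omega
        · have hb2 : (x == f) = false := by simpa using (Ne.symm hfx)
          simp only [List.count_cons, hb2, Bool.false_eq_true, if_false]
          omega

-- Nat-valued running minimum of feature counts over the remaining records
def pvNMin (k : String) (v : Nat) (rs : List (List (String × List String))) : Nat :=
  rs.foldl (fun m rec => min m ((pvFeats rec).count k)) v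

theorem pvNMin_le (k : String) (v : Nat) (rs : List (List (String × List String))) :
    pvNMin k v rs ≤ v := by
  induction rs generalizing v with
  | nil => simp [pvNMin]
  | cons r rs ih => exact le_trans (ih _) (min_le_left _ _)

-- the outer fold of B: every feature's count in the surviving list is the running minimum
theorem pvFold_count (rs : List (List (String × List String))) (l0 : List String) (f : String) :
    (rs.foldl (fun inter record => pvKeepLoop (pvFeats record) [] inter) l0).count f
      = pvNMin f (l0.count f) rs := by
  induction rs generalizing l0 with
  | nil => rfl
  | cons r rs ih =>
      rw [List.foldl_cons, ih, pvKeepLoop_count]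
      simp only [List.count_nil, Nat.zero_add]
      rfl

-- every survivor occurs in the first record's feature list
theorem pvFold_mem (rs : List (List (String × List String))) (l0 : List String) (x : String)
    (hx : x ∈ rs.foldl (fun inter record => pvKeepLoop (pvFeats record) [] inter) l0) :
    x ∈ l0 := by
  have h1 : 0 < (rs.foldl (fun inter record => pvKeepLoop (pvFeats record) [] inter) l0).count x :=
    List.count_pos_iff.mpr hx
  rw [pvFold_count] at h1
  have h2 := pvNMin_le x (l0.count x) rs
  exact List.count_pos_iff.mp (by omega)

theorem pvSum_map_add (s : List String) (f g : String → Nat) :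
    (s.map (fun k => f k + g k)).sum = (s.map f).sum + (s.map g).sum := by
  induction s with
  | nil => rfl
  | cons a s ih => simp [ih]; omega

theorem pvSum_map_ind (s : List String) (x : String) :
    (s.map (fun k => if (k == x) = true then 1 else 0)).sum = s.count x := by
  induction s with
  | nil => rfl
  | cons a s ih =>
      simp only [List.map_cons, List.sum_cons, List.count_cons, ih]
      by_cases h : a = x
      · subst h; simp [Nat.add_comm]
      · have h1 : (a == x) = false := by simpa using h
        have h2 : (x == a) = false := by simpa using (Ne.symm h)
        simp [h1]

-- summing the per-feature counts over a nodup list covering l gives the length of l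
theorem pvSum_count_eq_length (s : List String) (l : List String)
    (hnd : s.Nodup) (h : ∀ x ∈ l, x ∈ s) :
    (s.map (fun k => l.count k)).sum = l.length := by
  induction l with
  | nil => simp
  | cons x xs ih =>
      have hx : x ∈ s := h x List.mem_cons_self
      have hmap : s.map (fun k => (x :: xs).count k)
          = s.map (fun k => xs.count k + (if (k == x) = true then 1 else 0)) := by
        apply List.map_congr_left
        intro k _
        by_cases hk : k = x
        · subst hk; simp
        · simp [List.count_cons_of_ne (fun he => hk he.symm), hk]
      rw [hmap, pvSum_map_add, pvSum_map_ind,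
        ih (fun y hy => h y (List.mem_cons_of_mem _ hy)),
        List.count_eq_one_of_mem hnd hx]
      simp

-- the Int running minimum over counters is the Nat running minimum over feature lists
theorem pvMval_eq_nmin (k : String) (v : Nat) (rs : List (List (String × List String))) :
    pvMval k (v : Int) (rs.map pvCounterOf) = ((pvNMin k v rs : Nat) : Int) := by
  induction rs generalizing v with
  | nil => rfl
  | cons r rs ih =>
      rw [List.map_cons, pvMval_cons]
      have hg : (pvCounterOf r).getD k 0 = (((pvFeats r).count k : Nat) : Int) := by
        unfold pvCounterOf
        rw [PySem.Dict.getD_counter]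
      rw [hg]
      have hmin : min (v : Int) (((pvFeats r).count k : Nat) : Int)
          = ((min v ((pvFeats r).count k) : Nat) : Int) := by push_cast; rfl
      rw [hmin, ih]
      rfl

theorem pvSum_map_cast (s : List String) (f : String → Nat) :
    (s.map (fun k => ((f k : Nat) : Int))).sum = ((s.map f).sum : Int) := by
  induction s with
  | nil => rfl
  | cons a s ih => simp [ih]

-- ===== VERDICT (by name: the statement is the Claim_ definition above) =====
theorem find_similarity_score_features_set_un_spec : Claim_equal_find_similarity_score_features_set_un := by
  intro records _ hpre
  obtain ⟨hne, -⟩ := hpre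
  obtain ⟨r, rs, rfl⟩ := List.exists_cons_of_ne_nil hne
  unfold Spec_find_similarity_score_features_set_un
  unfold find_similarity_score_features_set_un find_similarity_score_features_set_un_alt
  simp only [PySem.List.foldl_append_singleton_eq_map, List.nil_append, List.singleton_append, List.foldl_cons]
  rw [pvOptFold, pvMatchSome]
  set final := rs.foldl (fun inter record => pvKeepLoop (pvFeats record) [] inter) (pvFeats r) with hfinal
  have hval : ((rs.map pvCounterOf).foldl pvCounterAnd (pvCounterOf r)).values
      = ((pvCounterOf r).items.filter
          (fun p => decide (0 < pvMval p.1 p.2 (rs.map pvCounterOf)))).map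
          (fun p => pvMval p.1 p.2 (rs.map pvCounterOf)) := by
    show ((rs.map pvCounterOf).foldl pvCounterAnd (pvCounterOf r)).items.map (fun p => p.2) = _
    rw [pvFoldInter_items _ _ (pvCounterOf_nodup r) (pvCounterOf_pos r), List.map_map]
    rfl
  rw [hval]
  have hgd : ∀ c ∈ rs.map pvCounterOf, ∀ k, 0 ≤ c.getD k 0 := by
    intro c hc k
    obtain ⟨rec, -, rfl⟩ := List.mem_map.mp hc
    exact pvCounterOf_getD_nonneg rec k
  rw [pvSum_filter_pos (fun p => pvMval p.1 p.2 (rs.map pvCounterOf)) (pvCounterOf r).items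
    (fun p hp => pvMval_nonneg _ _ _ (le_of_lt (pvCounterOf_pos r p hp)) (fun c hc => hgd c hc p.1))]
  have hitems : (pvCounterOf r).items
      = (PySem.Set.ofList (pvFeats r)).map (fun k => (k, ((pvFeats r).count k : Int))) := by
    unfold pvCounterOf
    exact PySem.Dict.items_counter _
  rw [hitems, List.map_map]
  have hpt : (PySem.Set.ofList (pvFeats r)).map
        ((fun p : String × Int => pvMval p.1 p.2 (rs.map pvCounterOf)) ∘
          (fun k => (k, ((pvFeats r).count k : Int))))
      = (PySem.Set.ofList (pvFeats r)).map (fun k => ((final.count k : Nat) : Int)) := by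
    apply List.map_congr_left
    intro k _
    show pvMval k (((pvFeats r).count k : Nat) : Int) (rs.map pvCounterOf) = _
    rw [pvMval_eq_nmin, hfinal, pvFold_count]
  rw [hpt, pvSum_map_cast,
    pvSum_count_eq_length _ final (PySem.Set.nodup_ofList _)
      (fun x hx => (PySem.Set.mem_ofList _ _).mpr (pvFold_mem rs (pvFeats r) x hx))]
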